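-- pv_equiv track=rewrite | github.com/zhi-zhi-zhi/Leetcode-zhi-zhi | src/bitmask/2172.maximum-and-sum-of-array/2172.maximum-and-sum-of-array.py | maximumANDSumVersion2
-- ===== SOURCE A (Python) =====
-- from functools import lru_cache
-- from typing import List
--
-- def maximumANDSumVersion2(nums: List[int], numSlots: int) -> int:
--     """
--     Recursion
--
--     Time complexity: O(3**numSlots * numSlots)
--     Space complexity: O(3**numSlots)
--
--     :param nums:
--     :param numSlots:
--     :return:
--     """
--     @lru_cache(None)
--     def dp(i, mask):
--         res = 0
--         if i == len(nums):
--             return 0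
--         for slot in range(1, numSlots + 1):
--             b = 3 ** (slot - 1)
--             if mask // b % 3 > 0:
--                 res = max(res, (nums[i] & slot) + dp(i + 1, mask - b))
--         return res
--
--     return dp(0, 3 ** numSlots - 1)
-- ===== SOURCE B (Python) =====
-- def maximumANDSumVersion2(nums, numSlots):
--     n = len(nums)
--     if n == 0:
--         return 0
--     full = 3 ** numSlots - 1
--     # levels[i] = set of masks reachable after placing nums[0..i-1]
--     prev = {full}
--     levels = [prev]
--     for _ in range(1, n):
--         nxt = set()
--         for m in prev:
--             b = 1
--             for slot in range(1, numSlots + 1):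
--                 if m // b % 3 > 0:
--                     nxt.add(m - b)
--                 b *= 3
--         levels.append(nxt)
--         prev = nxt
--     # tabulate bottom-up, level by level (element n-1 first)
--     vals = {}
--     for i in range(n - 1, -1, -1):
--         prev_vals = vals
--         vals = {}
--         for m in levels[i]:
--             best = 0
--             b = 1
--             for slot in range(1, numSlots + 1):
--                 if m // b % 3 > 0:
--                     v = (nums[i] & slot) + prev_vals.get(m - b, 0)
--                     if v > best:
--                         best = v
--                 b *= 3
--             vals[m] = best
--     return vals[full]
-- ===== Notes on version B (the rewrite author's own statement) =====
-- stated objective: alternative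
-- what changed: Replaces the memoized top-down recursion over (i, mask) with an iterative bottom-up tabulation: it first builds the per-level sets of reachable capacity masks, then fills per-level dictionaries of DP values from the deepest level upwards, returning the full-mask entry of level 0.
import Mathlib
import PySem

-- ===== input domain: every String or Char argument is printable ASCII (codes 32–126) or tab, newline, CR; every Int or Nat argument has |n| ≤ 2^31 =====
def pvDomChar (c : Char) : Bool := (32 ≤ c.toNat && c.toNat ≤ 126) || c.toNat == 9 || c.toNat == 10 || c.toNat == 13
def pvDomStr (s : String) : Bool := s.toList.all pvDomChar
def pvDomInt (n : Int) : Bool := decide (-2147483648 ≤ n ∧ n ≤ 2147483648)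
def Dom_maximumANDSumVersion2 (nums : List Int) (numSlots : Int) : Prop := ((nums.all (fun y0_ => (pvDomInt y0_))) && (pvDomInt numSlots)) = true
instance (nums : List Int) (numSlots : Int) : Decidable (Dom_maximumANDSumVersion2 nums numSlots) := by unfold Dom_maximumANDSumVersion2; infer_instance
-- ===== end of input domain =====

-- B replaces A's memoized recursion over (i, mask) by a bottom-up, level-by-level tabulation:
-- it first computes the sets of reachable capacity masks per number of placed elements, then
-- fills dictionaries of DP values from the last level upwards (objective: alternative
-- decomposition of the same DP; iteration replaces recursion, no memoized call graph).
-- Python B iterates over sets/dicts only to build sets/dicts looked up by key afterwards,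
-- so its result does not depend on Python's set iteration order; the port iterates in
-- insertion order, which is exact for the returned value.


-- ===== PORT A =====
-- dp(i, mask) of A, with explicit fuel = len(nums) - i (Python's guard 'i == len(nums)'
-- is exactly 'fuel = 0' on every reachable call, since i increases by 1 per level);
-- lru_cache only memoizes, it does not change the value.
def dpA (nums : List Int) (numSlots : Int) : Nat → Nat → Int → Int
  | 0, _, _ => 0
  | fuel + 1, i, mask =>
      (PySem.List.pyRange 1 (numSlots + 1) 1).foldl
        (fun res slot =>
          let b : Int := 3 ^ (slot - 1).toNat   -- 3 ** (slot - 1); slot ≥ 1 on every element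
          if 0 < PySem.Int.mod (PySem.Int.floordiv mask b) 3 then
            max res (PySem.Int.band (PySem.List.pyGetD nums (i : Int) 0) slot +
                       dpA nums numSlots fuel (i + 1) (mask - b))
          else res)
        0

-- 3 ** numSlots - 1: for numSlots < 0 Python's float mask makes every digit test false, so the
-- value 0 agrees with this port's mask 3^0 - 1 = 0 (the slot range is empty either way).
def maximumANDSumVersion2 (nums : List Int) (numSlots : Int) : Int :=
  dpA nums numSlots nums.length 0 (3 ^ numSlots.toNat - 1)

-- ===== PORT B =====
def maximumANDSumVersion2_alt (nums : List Int) (numSlots : Int) : Int :=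
  let n := nums.length
  if n = 0 then 0
  else
    let full : Int := 3 ^ numSlots.toNat - 1   -- 3 ** numSlots - 1, as in port A
    let prev : PySem.Set Int := PySem.Set.ofList [full]
    -- for _ in range(1, n): build the next level's reachable-mask set
    let st :=
      (PySem.List.pyRange 1 (n : Int) 1).foldl
        (fun st _ =>
          let levels := st.1
          let prev := st.2
          let nxt : PySem.Set Int :=
            prev.foldl
              (fun nxt m =>
                ((PySem.List.pyRange 1 (numSlots + 1) 1).foldl
                  (fun st2 _slot =>
                    ((if 0 < PySem.Int.mod (PySem.Int.floordiv m st2.2) 3 then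
                        PySem.Set.add st2.1 (m - st2.2)
                      else st2.1), st2.2 * 3))
                  ((nxt, 1) : PySem.Set Int × Int)).1)
              PySem.Set.empty
          (levels ++ [nxt], nxt))
        (([prev], prev) : List (PySem.Set Int) × PySem.Set Int)
    let levels := st.1
    -- for i in range(n - 1, -1, -1): tabulate this level's DP values from the next level's
    let vals : PySem.Dict Int Int :=
      (PySem.List.pyRange ((n : Int) - 1) (-1) (-1)).foldl
        (fun vals i =>
          let prev_vals := vals
          (PySem.List.pyGetD levels i []).foldl
            (fun vals m =>
              let best :=
                ((PySem.List.pyRange 1 (numSlots + 1) 1).foldl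
                  (fun st2 slot =>
                    let best := st2.1
                    let b := st2.2
                    let best' :=
                      if 0 < PySem.Int.mod (PySem.Int.floordiv m b) 3 then
                        let v := PySem.Int.band (PySem.List.pyGetD nums i 0) slot +
                                   PySem.Dict.getD prev_vals (m - b) 0
                        if best < v then v else best
                      else best
                    (best', b * 3))
                  ((0, 1) : Int × Int)).1
              PySem.Dict.insert vals m best)
            PySem.Dict.empty)
        PySem.Dict.empty
    PySem.Dict.getD vals full 0   -- vals[full]; full is always a key here since n ≥ 1

-- ===== PRECONDITION & SPEC =====
def Spec_maximumANDSumVersion2 (nums : List Int) (numSlots : Int) (out : Int) : Prop := out = maximumANDSumVersion2_alt nums numSlots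
instance (nums : List Int) (numSlots : Int) (out : Int) : Decidable (Spec_maximumANDSumVersion2 nums numSlots out) := by unfold Spec_maximumANDSumVersion2; infer_instance

-- ===== CLAIM (what is proved, stated in full; the proofs are below) =====
def Claim_equal_maximumANDSumVersion2 : Prop := ∀ (nums : List Int) (numSlots : Int), Dom_maximumANDSumVersion2 nums numSlots → Spec_maximumANDSumVersion2 nums numSlots (maximumANDSumVersion2 nums numSlots)

-- ===== LEMMAS AND PROOFS =====

-- ---- helper shapes of B's loops (used only by the proofs) ----

-- A's inner loop body after indexing the slot list by k (slot = 1 + k).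
def fA (nums : List Int) (ns : Int) (fuel' iN : Nat) (mask : Int) (res : Int) (k : Nat) : Int :=
  let b : Int := 3 ^ ((1 + (k:Int)) - 1).toNat
  if 0 < PySem.Int.mod (PySem.Int.floordiv mask b) 3 then
    max res (PySem.Int.band (PySem.List.pyGetD nums (iN : Int) 0) (1 + (k:Int)) +
               dpA nums ns fuel' (iN + 1) (mask - b))
  else res

-- B's best-value loop body after indexing the slot list by k.
def fB (nums : List Int) (prev : PySem.Dict Int Int) (i : Int) (mask : Int)
    (st : Int × Int) (k : Nat) : Int × Int :=
  let best := st.1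
  let b := st.2
  let best' :=
    if 0 < PySem.Int.mod (PySem.Int.floordiv mask b) 3 then
      let v := PySem.Int.band (PySem.List.pyGetD nums i 0) (1 + (k:Int)) +
                 PySem.Dict.getD prev (mask - b) 0
      if best < v then v else best
    else best
  (best', b * 3)

-- B's child-mask loop body after indexing the slot list by k.
def cB (mask : Int) (st : PySem.Set Int × Int) (_k : Nat) : PySem.Set Int × Int :=
  ((if 0 < PySem.Int.mod (PySem.Int.floordiv mask st.2) 3 then
      PySem.Set.add st.1 (mask - st.2)
    else st.1), st.2 * 3)

-- one level of B's reachable-mask construction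
def csf (numSlots : Int) (prev : PySem.Set Int) : PySem.Set Int :=
  prev.foldl
    (fun nxt m =>
      ((PySem.List.pyRange 1 (numSlots + 1) 1).foldl
        (fun st2 _slot =>
          ((if 0 < PySem.Int.mod (PySem.Int.floordiv m st2.2) 3 then
              PySem.Set.add st2.1 (m - st2.2)
            else st2.1), st2.2 * 3))
        ((nxt, 1) : PySem.Set Int × Int)).1)
    PySem.Set.empty

-- B's level sets: Lv j = the set of masks after placing j elements
def Lv (numSlots : Int) (l0 : PySem.Set Int) : Nat → PySem.Set Int
  | 0 => l0
  | j + 1 => csf numSlots (Lv numSlots l0 j)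

-- B's best value for one mask (verbatim inner fold of the vals loop)
def bestOf (nums : List Int) (numSlots : Int) (prev_vals : PySem.Dict Int Int)
    (i : Int) (m : Int) : Int :=
  ((PySem.List.pyRange 1 (numSlots + 1) 1).foldl
    (fun st2 slot =>
      let best := st2.1
      let b := st2.2
      let best' :=
        if 0 < PySem.Int.mod (PySem.Int.floordiv m b) 3 then
          let v := PySem.Int.band (PySem.List.pyGetD nums i 0) slot +
                     PySem.Dict.getD prev_vals (m - b) 0
          if best < v then v else best
        else best
      (best', b * 3))
    ((0, 1) : Int × Int)).1

def lvlVals (nums : List Int) (numSlots : Int) (prev_vals : PySem.Dict Int Int)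
    (i : Int) (lvl : List Int) : PySem.Dict Int Int :=
  lvl.foldl (fun vals m => PySem.Dict.insert vals m (bestOf nums numSlots prev_vals i m))
    PySem.Dict.empty

def bdPair (numSlots : Int) (n : Nat) (full : Int) :
    List (PySem.Set Int) × PySem.Set Int :=
  (PySem.List.pyRange 1 (n : Int) 1).foldl
    (fun st _ => (st.1 ++ [csf numSlots st.2], csf numSlots st.2))
    ([PySem.Set.ofList [full]], PySem.Set.ofList [full])

def bdVals (nums : List Int) (numSlots : Int) (n : Nat) (full : Int) : PySem.Dict Int Int :=
  (PySem.List.pyRange ((n : Int) - 1) (-1) (-1)).foldl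
    (fun vals i => lvlVals nums numSlots vals i
        (PySem.List.pyGetD (bdPair numSlots n full).1 i []))
    PySem.Dict.empty

theorem alt_eq_helper (nums : List Int) (numSlots : Int) :
    maximumANDSumVersion2_alt nums numSlots =
      if nums.length = 0 then 0
      else PySem.Dict.getD
        (bdVals nums numSlots nums.length (3 ^ numSlots.toNat - 1)) (3 ^ numSlots.toNat - 1) 0 := rfl

-- ---- generic list/range lemmas ----

theorem pyRange_slots (c : Nat) :
    PySem.List.pyRange 1 ((c:Int) + 1) 1 = (List.range c).map (fun (k : Nat) => (1:Int) + (k:Int)) := by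
  rw [PySem.List.pyRange_one]; norm_num

theorem slots_toNat (ns : Int) :
    PySem.List.pyRange 1 (ns + 1) 1 = PySem.List.pyRange 1 ((ns.toNat : Int) + 1) 1 := by
  by_cases h : 0 ≤ ns
  · rw [show ((ns.toNat : Nat) : Int) = ns by omega]
  · rw [PySem.List.pyRange_one_eq_nil (by omega), PySem.List.pyRange_one_eq_nil (by omega)]

theorem foldl_congr' {α β : Type} (f g : β → α → β) (l : List α) (init : β)
    (h : ∀ r a, a ∈ l → f r a = g r a) : l.foldl f init = l.foldl g init := by
  induction l generalizing init with
  | nil => rfl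
  | cons x xs ih =>
    simp only [List.foldl_cons]
    rw [h init x (by simp)]
    exact ih _ (fun r a ha => h r a (by simp [ha]))

theorem dpA_toNat (nums : List Int) (ns : Int) :
    ∀ (fuel i : Nat) (mask : Int),
      dpA nums ns fuel i mask = dpA nums ((ns.toNat : Nat) : Int) fuel i mask := by
  intro fuel
  induction fuel with
  | zero => intro i mask; rfl
  | succ fuel ih =>
    intro i mask
    simp only [dpA]
    rw [slots_toNat ns]
    exact foldl_congr' _ _ _ _ (fun r a _ => by rw [ih])

-- dpA at positive fuel, as a fold over slot indices.
theorem dpA_succ_eq (nums : List Int) (S fuel i : Nat) (mask : Int) :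
    dpA nums (S : Int) (fuel + 1) i mask =
      (List.range S).foldl (fA nums (S : Int) fuel i mask) 0 := by
  simp only [dpA]
  rw [pyRange_slots S, List.foldl_map]
  rfl

theorem fB_snd (nums : List Int) (prev : PySem.Dict Int Int) (i mask : Int) :
    ∀ (c : Nat) (st : Int × Int),
      ((List.range c).foldl (fB nums prev i mask) st).2 = st.2 * 3 ^ c := by
  intro c
  induction c with
  | zero => intro st; simp
  | succ c ih =>
    intro st
    rw [List.range_succ, List.foldl_append]
    simp only [List.foldl_cons, List.foldl_nil, fB, ih]
    ring

theorem inner_eq (nums : List Int) (prev : PySem.Dict Int Int) (ns : Int)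
    (fuel' iN : Nat) (mask : Int) :
    ∀ (c : Nat) (res : Int),
      (∀ p : Nat, p < c → 0 < PySem.Int.mod (PySem.Int.floordiv mask ((3:Int) ^ p)) 3 →
        dpA nums ns fuel' (iN + 1) (mask - 3 ^ p) = PySem.Dict.getD prev (mask - (3:Int) ^ p) 0) →
      ((List.range c).foldl (fB nums prev (iN : Int) mask) (res, 1)).1 =
        (List.range c).foldl (fA nums ns fuel' iN mask) res := by
  intro c
  induction c with
  | zero => intro res H; simp
  | succ c ih =>
    intro res H
    rw [List.range_succ, List.foldl_append, List.foldl_append]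
    simp only [List.foldl_cons, List.foldl_nil]
    have hsnd := fB_snd nums prev (iN : Int) mask c ((res, 1) : Int × Int)
    have hfst := ih res (fun p hp => H p (by omega))
    have hb : (((1:Int) + (c:Int)) - 1).toNat = c := by simp
    set X := ((List.range c).foldl (fB nums prev (iN : Int) mask) (res, 1)) with hX
    have h2 : X.2 = 3 ^ c := by rw [hsnd]; ring
    simp only [fB, fA, h2, hfst, hb]
    by_cases hc : 0 < PySem.Int.mod (PySem.Int.floordiv mask ((3:Int) ^ c)) 3
    · rw [if_pos hc, if_pos hc, H c (by omega) hc, max_def]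
      split_ifs <;> omega
    · rw [if_neg hc, if_neg hc]

-- ---- reachable-level set lemmas ----

theorem cB_snd (mask : Int) :
    ∀ (c : Nat) (st : PySem.Set Int × Int),
      ((List.range c).foldl (cB mask) st).2 = st.2 * 3 ^ c := by
  intro c
  induction c with
  | zero => intro st; simp
  | succ c ih =>
    intro st
    rw [List.range_succ, List.foldl_append]
    simp only [List.foldl_cons, List.foldl_nil, cB, ih]
    ring

theorem mem_cB_fold (mask : Int) :
    ∀ (c : Nat) (st : PySem.Set Int × Int) (x : Int),
      x ∈ st.1 → x ∈ ((List.range c).foldl (cB mask) st).1 := by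
  intro c
  induction c with
  | zero => intro st x hx; simpa using hx
  | succ c ih =>
    intro st x hx
    rw [List.range_succ, List.foldl_append]
    simp only [List.foldl_cons, List.foldl_nil, cB]
    split
    · exact (PySem.Set.mem_add _ _ _).2 (Or.inl (ih st x hx))
    · exact ih st x hx

theorem child_mem_cB (mask : Int) (c p : Nat) (s0 : PySem.Set Int)
    (hp : p < c) (hd : 0 < PySem.Int.mod (PySem.Int.floordiv mask ((3:Int) ^ p)) 3) :
    (mask - 3 ^ p) ∈ ((List.range c).foldl (cB mask) (s0, 1)).1 := by
  induction c with
  | zero => omega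
  | succ c ih =>
    rw [List.range_succ, List.foldl_append]
    simp only [List.foldl_cons, List.foldl_nil, cB]
    have hsnd := cB_snd mask c ((s0, 1) : PySem.Set Int × Int)
    simp only [hsnd, one_mul]
    by_cases hpc : p < c
    · split
      · exact (PySem.Set.mem_add _ _ _).2 (Or.inl (ih hpc))
      · exact ih hpc
    · have hpe : p = c := by omega
      subst hpe
      rw [if_pos hd]
      exact (PySem.Set.mem_add _ _ _).2 (Or.inr rfl)

-- the inner child fold of csf, as a fold over slot indices
theorem csf_eq (numSlots : Int) (prev : PySem.Set Int) :
    csf numSlots prev =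
      prev.foldl (fun nxt m => ((List.range numSlots.toNat).foldl (cB m) (nxt, 1)).1)
        PySem.Set.empty := by
  unfold csf
  apply foldl_congr'
  intro r m _
  rw [slots_toNat numSlots, pyRange_slots numSlots.toNat, List.foldl_map]
  rfl

theorem mem_csf_fold (numSlots : Int) (l : List Int) :
    ∀ (acc : PySem.Set Int) (x : Int), x ∈ acc →
      x ∈ l.foldl (fun nxt m => ((List.range numSlots.toNat).foldl (cB m) (nxt, 1)).1) acc := by
  induction l with
  | nil => intro acc x hx; exact hx
  | cons y ys ih =>
    intro acc x hx
    simp only [List.foldl_cons]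
    exact ih _ x (mem_cB_fold y numSlots.toNat ((acc, 1)) x hx)

theorem csf_mem (numSlots : Int) (prev : PySem.Set Int) (m : Int) (p : Nat)
    (hm : m ∈ prev) (hp : p < numSlots.toNat)
    (hd : 0 < PySem.Int.mod (PySem.Int.floordiv m ((3:Int) ^ p)) 3) :
    (m - 3 ^ p) ∈ csf numSlots prev := by
  rw [csf_eq]
  obtain ⟨l1, l2, rfl⟩ := List.append_of_mem hm
  rw [List.foldl_append]
  simp only [List.foldl_cons]
  exact mem_csf_fold numSlots l2 _ _
    (child_mem_cB m numSlots.toNat p _ hp hd)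

-- ---- the level-list construction ----

theorem bdPair_eq (numSlots : Int) (full : Int) :
    ∀ (n : Nat), 1 ≤ n →
      bdPair numSlots n full =
        ((List.range n).map (Lv numSlots (PySem.Set.ofList [full])),
          Lv numSlots (PySem.Set.ofList [full]) (n - 1)) := by
  intro n
  induction n with
  | zero => omega
  | succ n ih =>
    intro _
    by_cases hn : n = 0
    · subst hn
      unfold bdPair
      rw [PySem.List.pyRange_one_eq_nil (by norm_num)]
      rfl
    · have hb : bdPair numSlots (n + 1) full =
          (fun st (_ : Int) => (st.1 ++ [csf numSlots st.2], csf numSlots st.2))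
            (bdPair numSlots n full) (n : Int) := by
        unfold bdPair
        rw [show ((n + 1 : Nat) : Int) = (n : Int) + 1 by push_cast; ring,
            PySem.List.pyRange_one_succ_right (by omega), List.foldl_append]
        rfl
      rw [hb, ih (by omega)]
      have hLv : Lv numSlots (PySem.Set.ofList [full]) n =
          csf numSlots (Lv numSlots (PySem.Set.ofList [full]) (n - 1)) := by
        conv_lhs => rw [show n = (n - 1) + 1 by omega]
        rfl
      simp [List.range_succ, hLv]

-- ---- dictionary building ----

theorem dict_fold_getD (f : Int → Int) :
    ∀ (L : List Int) (d : PySem.Dict Int Int) (m : Int),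
      PySem.Dict.getD (L.foldl (fun vals x => PySem.Dict.insert vals x (f x)) d) m 0 =
        if m ∈ L then f m else PySem.Dict.getD d m 0 := by
  intro L
  induction L with
  | nil => intro d m; simp
  | cons x xs ih =>
    intro d m
    simp only [List.foldl_cons]
    rw [ih]
    by_cases hx : m ∈ xs
    · rw [if_pos hx, if_pos (by simp [hx])]
    · rw [if_neg hx, PySem.Dict.getD_insert]
      by_cases hmx : m = x
      · subst hmx; rw [if_pos rfl, if_pos (by simp)]
      · rw [if_neg hmx, if_neg (by simp [hx, hmx])]

-- ---- the backward tabulation loop ----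

theorem bestOf_eq (nums : List Int) (numSlots : Int) (prev : PySem.Dict Int Int) (i m : Int) :
    bestOf nums numSlots prev i m =
      ((List.range numSlots.toNat).foldl (fB nums prev i m) ((0, 1) : Int × Int)).1 := by
  unfold bestOf
  rw [slots_toNat numSlots, pyRange_slots numSlots.toNat, List.foldl_map]
  rfl

theorem vals_inv (nums : List Int) (numSlots : Int) (n : Nat) (full : Int) (hn : 1 ≤ n) :
    ∀ (t : Nat), t ≤ n → ∀ (m : Int),
      PySem.Dict.getD
        ((List.range t).foldl
          (fun (vals : PySem.Dict Int Int) (k : Nat) => lvlVals nums numSlots vals ((n : Int) - 1 - (k : Int))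
              (PySem.List.pyGetD ((List.range n).map (Lv numSlots (PySem.Set.ofList [full])))
                ((n : Int) - 1 - (k : Int)) []))
          PySem.Dict.empty) m 0 =
        if m ∈ (if n - t < n then Lv numSlots (PySem.Set.ofList [full]) (n - t) else []) then
          dpA nums ((numSlots.toNat : Nat) : Int) t (n - t) m
        else 0 := by
  intro t
  induction t with
  | zero =>
    intro _ m
    simp only [List.range_zero, List.foldl_nil]
    have h0 : ¬ (n - 0 < n) := by omega
    rw [if_neg h0]
    simp
  | succ t ih =>
    intro hts m
    rw [List.range_succ, List.foldl_append]
    simp only [List.foldl_cons, List.foldl_nil]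
    set prevD := (List.range t).foldl
        (fun (vals : PySem.Dict Int Int) (k : Nat) => lvlVals nums numSlots vals ((n : Int) - 1 - (k : Int))
            (PySem.List.pyGetD ((List.range n).map (Lv numSlots (PySem.Set.ofList [full])))
              ((n : Int) - 1 - (k : Int)) []))
        PySem.Dict.empty with hprevD
    have hidx : ((n : Int) - 1 - (t : Int)) = (((n - 1 - t : Nat)) : Int) := by omega
    have hlvl : PySem.List.pyGetD ((List.range n).map (Lv numSlots (PySem.Set.ofList [full])))
        ((n : Int) - 1 - (t : Int)) [] = Lv numSlots (PySem.Set.ofList [full]) (n - 1 - t) := by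
      rw [hidx, PySem.List.pyGetD_natCast]
      simp only [List.getD, List.getElem?_map, List.getElem?_range (by omega : n - 1 - t < n)]
      rfl
    rw [hlvl]
    unfold lvlVals
    rw [dict_fold_getD]
    rw [show n - (t + 1) = n - 1 - t by omega,
        if_pos (show n - 1 - t < n by omega)]
    by_cases hm : m ∈ Lv numSlots (PySem.Set.ofList [full]) (n - 1 - t)
    · rw [if_pos hm, if_pos hm]
      rw [bestOf_eq, hidx]
      have H : ∀ p : Nat, p < numSlots.toNat →
          0 < PySem.Int.mod (PySem.Int.floordiv m ((3:Int) ^ p)) 3 →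
          dpA nums ((numSlots.toNat : Nat) : Int) t ((n - 1 - t) + 1) (m - 3 ^ p) =
            PySem.Dict.getD prevD (m - (3:Int) ^ p) 0 := by
        intro p hp hd
        rw [show n - 1 - t + 1 = n - t by omega, ih (by omega) (m - 3 ^ p)]
        by_cases ht0 : t = 0
        · subst ht0
          rw [if_neg (show ¬ (n - 0 < n) by omega)]
          rfl
        · have hmem : (m - 3 ^ p) ∈ Lv numSlots (PySem.Set.ofList [full]) (n - t) := by
            rw [show n - t = (n - 1 - t) + 1 by omega]
            exact csf_mem numSlots _ m p hm hp hd
          rw [if_pos (show n - t < n by omega), if_pos hmem]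
      rw [inner_eq nums prevD ((numSlots.toNat : Nat) : Int) t (n - 1 - t) m numSlots.toNat 0 H,
          ← dpA_succ_eq]
    · rw [if_neg hm, if_neg hm]
      simp

-- ===== VERDICT (by name: the statement is the Claim_ definition above) =====
theorem maximumANDSumVersion2_spec : Claim_equal_maximumANDSumVersion2 := by
  intro nums numSlots _hdom
  unfold Spec_maximumANDSumVersion2
  rw [alt_eq_helper]
  by_cases hn : nums.length = 0
  · rw [if_pos hn]
    unfold maximumANDSumVersion2
    rw [hn]
    rfl
  · rw [if_neg hn]
    unfold maximumANDSumVersion2 bdVals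
    rw [dpA_toNat]
    rw [bdPair_eq numSlots (3 ^ numSlots.toNat - 1) nums.length (by omega)]
    rw [PySem.List.pyRange_neg_one,
        show (((nums.length : Int) - 1) - (-1)).toNat = nums.length by omega,
        List.foldl_map]
    have hv := vals_inv nums numSlots nums.length (3 ^ numSlots.toNat - 1) (by omega)
      nums.length (le_refl _) (3 ^ numSlots.toNat - 1)
    rw [Nat.sub_self] at hv
    have h1 : (0:Nat) < nums.length := by omega
    rw [if_pos h1] at hv
    have hmem : (3 ^ numSlots.toNat - 1 : Int) ∈
        Lv numSlots (PySem.Set.ofList [(3 ^ numSlots.toNat - 1 : Int)]) 0 := by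
      show (3 ^ numSlots.toNat - 1 : Int) ∈ PySem.Set.ofList [(3 ^ numSlots.toNat - 1 : Int)]
      rw [PySem.Set.mem_ofList]
      simp
    rw [if_pos hmem] at hv
    rw [← hv]
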